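-- pv_equiv track=rewrite | github.com/Hohichh/BSUIR | Second course/sem4/AOIS/lab1/two_complement_sum.py | two_complement_sum
-- ===== SOURCE A (Python) =====
-- def two_complement_sum(first_num: str, second_num:str):
--     summary = ''
--     carry = 0
--     #складываем в столбик каждый бит одного числа с другим
--     for first_bit, second_bit in zip(first_num[::-1], second_num[::-1]):
--         result = int(first_bit) + int(second_bit) + carry
--         if result == 2:
--             summary = '0' + summary
--             carry = 1
--         elif result == 3:
--             summary = '1' + summary
--             carry = 1
--         else:
--             summary = str(result) + summary
--             carry = 0
--     #при переполнении просто добавляем единицу в конец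
--     if carry == 1:
--         summary = '1' + summary
--     if len(summary) > 32:
--         summary = summary[-32:]
--
--     return summary
-- ===== SOURCE B (Python) =====
-- def two_complement_sum(first_num, second_num):
--     n = min(len(first_num), len(second_num))
--     if n == 0:
--         return ''
--     val = 0
--     for f, s in zip(first_num[-n:], second_num[-n:]):
--         val = 2 * val + (f == '1') + (s == '1')
--     out = format(val, '0{}b'.format(n))
--     return out[-32:] if len(out) > 32 else out
-- ===== Notes on version B (the rewrite author's own statement) =====
-- stated objective: idiomatic
-- what changed: Replaces the bit-by-bit carry loop that builds the result string by prepending characters with plain integer arithmetic: one pass accumulates the sum of the two low-n bit columns as a single integer (no carry variable, no string building), then format(val, '0nb') renders it zero-padded to n bits (n+1 on overflow) and the last 32 characters are kept.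
-- outside the precondition, e.g. on two_complement_sum('3', '4'): A returns '7', B returns '0'; on two_complement_sum('2', '0'): A returns '10', B returns '0'; on two_complement_sum('a', '1'): A raises ValueError, B returns '1'
import Mathlib
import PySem

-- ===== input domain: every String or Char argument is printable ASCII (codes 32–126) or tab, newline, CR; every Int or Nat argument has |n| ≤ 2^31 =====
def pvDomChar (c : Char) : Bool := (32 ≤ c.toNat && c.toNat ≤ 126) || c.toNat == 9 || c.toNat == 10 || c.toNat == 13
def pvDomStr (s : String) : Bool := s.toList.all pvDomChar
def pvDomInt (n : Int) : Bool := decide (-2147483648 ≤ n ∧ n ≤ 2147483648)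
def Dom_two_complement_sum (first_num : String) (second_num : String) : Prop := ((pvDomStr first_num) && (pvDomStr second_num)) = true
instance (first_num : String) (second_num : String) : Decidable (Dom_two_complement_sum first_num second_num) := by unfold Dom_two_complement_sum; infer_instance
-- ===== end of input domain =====

-- B replaces A's bit-by-bit carry loop (string built by prepending) with one integer
-- accumulation of the aligned low bits plus fixed-width binary formatting (objective: idiomatic).


-- ===== PORT A =====
-- int(ch) for a one-character string; the `.getD 0` is unreachable under Pre_ (there Python raises ValueError)
def pvBitA (c : Char) : Int := (PySem.Int.ofChars? [c]).getD 0

-- the `for first_bit, second_bit in zip(first_num[::-1], second_num[::-1])` loop of A, state = (summary, carry)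
def pvALoop : List (Char × Char) → List Char → Int → List Char × Int
  | [], summary, carry => (summary, carry)
  | (f, sd) :: rest, summary, carry =>
      let result := pvBitA f + pvBitA sd + carry
      if result = 2 then pvALoop rest ('0' :: summary) 1
      else if result = 3 then pvALoop rest ('1' :: summary) 1
      else pvALoop rest (PySem.Int.toChars result ++ summary) 0

def two_complement_sum (first_num : String) (second_num : String) : String :=
  let p := pvALoop ((first_num.toList.reverse).zip (second_num.toList.reverse)) [] 0
  let summary := if p.2 = 1 then '1' :: p.1 else p.1
  -- summary[-32:] when len(summary) > 32 is exactly `drop (len - 32)`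
  let summary2 := if summary.length > 32 then summary.drop (summary.length - 32) else summary
  String.mk summary2

-- ===== PORT B =====
-- binary digits of v (high-to-low), empty for 0; with the zero padding below this is
-- exactly format(val, '0{n}b') for v ≥ 0, n ≥ 1
def pvNatToBin (v : Nat) : List Char :=
  if h : v = 0 then [] else pvNatToBin (v / 2) ++ [if v % 2 = 1 then '1' else '0']
  decreasing_by exact Nat.div_lt_self (Nat.pos_of_ne_zero h) (by omega)

-- (c == '1') used as an int
def pvBit (c : Char) : Nat := if c = '1' then 1 else 0

def two_complement_sum_alt (first_num : String) (second_num : String) : String :=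
  let n := min first_num.toList.length second_num.toList.length
  if n = 0 then "" else
  let a := first_num.toList.drop (first_num.toList.length - n)   -- first_num[-n:]
  let b := second_num.toList.drop (second_num.toList.length - n) -- second_num[-n:]
  let val := (a.zip b).foldl (fun acc p => 2 * acc + pvBit p.1 + pvBit p.2) 0
  let out := List.replicate (n - (pvNatToBin val).length) '0' ++ pvNatToBin val  -- format(val, '0{n}b')
  String.mk (if out.length > 32 then out.drop (out.length - 32) else out)

-- ===== PRECONDITION & SPEC =====
-- Pre_ restricts to the natural domain: every pair of overlapping (low) characters is '0' or '1'.
-- On other inputs A raises ValueError (non-digit characters), or — for digit characters 2-9 —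
-- returns concatenations of decimal digit sums that are not two's-complement bit strings.
def Pre_two_complement_sum (first_num : String) (second_num : String) : Prop :=
  ∀ p ∈ (first_num.toList.reverse).zip (second_num.toList.reverse),
    (p.1 = '0' ∨ p.1 = '1') ∧ (p.2 = '0' ∨ p.2 = '1')
instance (first_num : String) (second_num : String) : Decidable (Pre_two_complement_sum first_num second_num) := by
  unfold Pre_two_complement_sum; infer_instance

def pvWitness_two_complement_sum : String × String := ("1011", "0110")

def Spec_two_complement_sum (first_num : String) (second_num : String) (out : String) : Prop := out = two_complement_sum_alt first_num second_num
instance (first_num : String) (second_num : String) (out : String) : Decidable (Spec_two_complement_sum first_num second_num out) := by unfold Spec_two_complement_sum; infer_instance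

-- ===== CLAIM (what is proved, stated in full; the proofs are below) =====
def Claim_equal_two_complement_sum : Prop := ∀ (first_num : String) (second_num : String), Dom_two_complement_sum first_num second_num → Pre_two_complement_sum first_num second_num → Spec_two_complement_sum first_num second_num (two_complement_sum first_num second_num)

-- ===== LEMMAS AND PROOFS =====

-- value of a high-to-low bit string
def pvVal (l : List Char) : Nat := l.foldl (fun a c => 2 * a + pvBit c) 0

def pvAllBin (l : List Char) : Prop := ∀ c ∈ l, c = '0' ∨ c = '1'

-- value of a low-to-high list of bit pairs
def pvValRev : List (Char × Char) → Nat
  | [] => 0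
  | p :: r => pvBit p.1 + pvBit p.2 + 2 * pvValRev r

-- low k bits of v, high-to-low
def pvLowBits : Nat → Nat → List Char
  | 0, _ => []
  | k + 1, v => pvLowBits k (v / 2) ++ [if v % 2 = 1 then '1' else '0']

lemma pvVal_from (l : List Char) : ∀ acc : Nat,
    l.foldl (fun a c => 2 * a + pvBit c) acc = acc * 2 ^ l.length + pvVal l := by
  induction l with
  | nil => intro acc; simp [pvVal]
  | cons c l ih =>
      intro acc
      simp only [List.foldl_cons, List.length_cons, pvVal] at *
      rw [ih (2 * acc + pvBit c), ih (2 * 0 + pvBit c), pow_succ]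
      ring

lemma pvVal_cons (c : Char) (l : List Char) :
    pvVal (c :: l) = pvBit c * 2 ^ l.length + pvVal l := by
  show l.foldl _ (2 * 0 + pvBit c) = _
  rw [pvVal_from]; ring

lemma pvVal_append (u v : List Char) :
    pvVal (u ++ v) = pvVal u * 2 ^ v.length + pvVal v := by
  show (u ++ v).foldl _ _ = _
  rw [List.foldl_append, pvVal_from]
  rfl

lemma pvBit_le (c : Char) : pvBit c ≤ 1 := by
  unfold pvBit; split <;> omega

lemma pvVal_lt (l : List Char) : pvVal l < 2 ^ l.length := by
  induction l with
  | nil => simp [pvVal]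
  | cons c l ih =>
      rw [pvVal_cons, List.length_cons, pow_succ]
      have := pvBit_le c
      nlinarith

lemma pvVal_replicate_zero (m : Nat) : pvVal (List.replicate m '0') = 0 := by
  induction m with
  | zero => simp [pvVal]
  | succ m ih => rw [List.replicate_succ, pvVal_cons, ih]; simp [pvBit]

-- B's pair fold computes the sum of the two column values
lemma pvPairFold (a b : List Char) (h : a.length = b.length) (acc1 acc2 : Nat) :
    (a.zip b).foldl (fun acc p => 2 * acc + pvBit p.1 + pvBit p.2) (acc1 + acc2) =
      a.foldl (fun x c => 2 * x + pvBit c) acc1 + b.foldl (fun x c => 2 * x + pvBit c) acc2 := by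
  induction a generalizing b acc1 acc2 with
  | nil =>
      cases b with
      | nil => simp
      | cons d b' => simp at h
  | cons c a' ih =>
      cases b with
      | nil => simp at h
      | cons d b' =>
          simp only [List.zip_cons_cons, List.foldl_cons]
          have : 2 * (acc1 + acc2) + pvBit c + pvBit d
              = (2 * acc1 + pvBit c) + (2 * acc2 + pvBit d) := by ring
          rw [this, ih b' (by simpa using h)]

lemma pvValRev_append_singleton (l : List (Char × Char)) (p : Char × Char) :
    pvValRev (l ++ [p]) = pvValRev l + 2 ^ l.length * (pvBit p.1 + pvBit p.2) := by
  induction l with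
  | nil => simp [pvValRev]
  | cons q l ih =>
      simp only [List.cons_append, pvValRev, List.length_cons, ih, pow_succ]
      ring

-- A consumes the reversed zip; its value is the same sum
lemma pvValRev_zip_reverse (a : List Char) : ∀ b : List Char, a.length = b.length →
    pvValRev (a.reverse.zip b.reverse) = pvVal a + pvVal b := by
  induction a with
  | nil =>
      intro b h
      cases b with
      | nil => simp [pvValRev, pvVal]
      | cons d b' => simp at h
  | cons c a' ih =>
      intro b h
      cases b with
      | nil => simp at h
      | cons d b' =>
          have hlen : a'.length = b'.length := by simpa using h
          simp only [List.reverse_cons]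
          rw [List.zip_append (by simp [hlen])]
          have hz : [c].zip [d] = [(c, d)] := rfl
          rw [hz, pvValRev_append_singleton, ih b' hlen, pvVal_cons, pvVal_cons]
          simp only [List.length_zip, List.length_reverse, hlen, min_self]
          ring

lemma pvLowBits_length (k : Nat) : ∀ v, (pvLowBits k v).length = k := by
  induction k with
  | zero => intro v; rfl
  | succ k ih => intro v; simp [pvLowBits, ih]

lemma pvVal_lowBits (k : Nat) : ∀ v, pvVal (pvLowBits k v) = v % 2 ^ k := by
  induction k with
  | zero => intro v; simp [pvLowBits, pvVal, Nat.mod_one]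
  | succ k ih =>
      intro v
      rw [pvLowBits, pvVal_append, ih, pow_succ, mul_comm (2^k) 2, Nat.mod_mul]
      have hb : pvVal [if v % 2 = 1 then '1' else '0'] = v % 2 := by
        rcases Nat.mod_two_eq_zero_or_one v with h | h <;> simp [h, pvVal, pvBit]
      rw [hb]
      simp
      ring

lemma pvLowBits_allBin (k : Nat) : ∀ v, pvAllBin (pvLowBits k v) := by
  induction k with
  | zero => intro v c hc; simp [pvLowBits] at hc
  | succ k ih =>
      intro v c hc
      simp only [pvLowBits, List.mem_append, List.mem_singleton] at hc
      rcases hc with hc | hc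
      · exact ih _ c hc
      · subst hc; split <;> simp

lemma pvBitA_of_bin (c : Char) (h : c = '0' ∨ c = '1') : pvBitA c = (pvBit c : Int) := by
  rcases h with rfl | rfl <;> decide

lemma pvStep (n V x b' : Nat) (ch : Char) (hd : x / 2 = V + b')
    (hm : (if x % 2 = 1 then '1' else '0') = ch) (s : List Char) :
    pvLowBits n (V + b') ++ (ch :: s) = pvLowBits (n + 1) x ++ s ∧
      x / 2 ^ (n + 1) = (V + b') / 2 ^ n := by
  constructor
  · show _ = (pvLowBits n (x / 2) ++ [if x % 2 = 1 then '1' else '0']) ++ s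
    rw [hd, hm, List.append_assoc]
    rfl
  · rw [← hd, Nat.div_div_eq_div_mul]
    congr 1
    rw [pow_succ]; ring

-- A's loop invariant
lemma pvALoop_spec (ps : List (Char × Char))
    (hbin : ∀ p ∈ ps, (p.1 = '0' ∨ p.1 = '1') ∧ (p.2 = '0' ∨ p.2 = '1')) :
    ∀ (s : List Char) (b : Nat), b ≤ 1 →
      pvALoop ps s (b : Int) =
        (pvLowBits ps.length (pvValRev ps + b) ++ s, (((pvValRev ps + b) / 2 ^ ps.length : Nat) : Int)) := by
  induction ps with
  | nil =>
      intro s b _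
      simp [pvALoop, pvLowBits, pvValRev]
  | cons p rest ih =>
      obtain ⟨f, g⟩ := p
      intro s b hb
      have hfg := hbin (f, g) (List.mem_cons_self ..)
      have hbin' : ∀ q ∈ rest, (q.1 = '0' ∨ q.1 = '1') ∧ (q.2 = '0' ∨ q.2 = '1') :=
        fun q hq => hbin q (List.mem_cons_of_mem _ hq)
      have hrec := ih hbin'
      simp only [pvALoop, pvBitA_of_bin f hfg.1, pvBitA_of_bin g hfg.2]
      have hcast : (pvBit f : Int) + (pvBit g : Int) + (b : Int)
          = ((pvBit f + pvBit g + b : Nat) : Int) := by push_cast; ring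
      rw [hcast]
      have hf := pvBit_le f
      have hg := pvBit_le g
      have hval : pvValRev ((f, g) :: rest) + b
          = (pvBit f + pvBit g + b) + 2 * pvValRev rest := by
        simp only [pvValRev]; ring
      simp only [List.length_cons, hval]
      set V := pvValRev rest with hV
      set n := rest.length with hn
      set r := pvBit f + pvBit g + b with hr
      clear_value V r
      have hr3 : r ≤ 3 := by omega
      interval_cases r
      · -- r = 0 : else branch, str(0) = "0", carry 0
        rw [if_neg (by norm_num), if_neg (by norm_num)]
        obtain ⟨hl, hc⟩ := pvStep n V (0 + 2*V) 0 '0' (by omega) (by rw [show (0 + 2*V) % 2 = 0 from by omega]; rfl) s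
        have h0 := hrec ('0' :: s) 0 (by omega)
        simp only [Nat.cast_zero] at h0 ⊢
        rw [show PySem.Int.toChars 0 = ['0'] from by decide]
        rw [show (['0'] : List Char) ++ s = '0' :: s from rfl, h0, hl, hc]
      · -- r = 1 : else branch, str(1) = "1", carry 0
        rw [if_neg (by norm_num), if_neg (by norm_num)]
        obtain ⟨hl, hc⟩ := pvStep n V (1 + 2*V) 0 '1' (by omega) (by rw [show (1 + 2*V) % 2 = 1 from by omega]; rfl) s
        have h0 := hrec ('1' :: s) 0 (by omega)
        simp only [Nat.cast_zero, Nat.cast_one] at h0 ⊢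
        rw [show PySem.Int.toChars 1 = ['1'] from by decide]
        rw [show (['1'] : List Char) ++ s = '1' :: s from rfl, h0, hl, hc]
      · -- r = 2 : '0', carry 1
        rw [if_pos (by norm_num)]
        obtain ⟨hl, hc⟩ := pvStep n V (2 + 2*V) 1 '0' (by omega) (by rw [show (2 + 2*V) % 2 = 0 from by omega]; rfl) s
        have h0 := hrec ('0' :: s) 1 (by omega)
        simp only [Nat.cast_one] at h0
        rw [h0, hl, hc]
      · -- r = 3 : '1', carry 1
        rw [if_neg (by norm_num), if_pos (by norm_num)]
        obtain ⟨hl, hc⟩ := pvStep n V (3 + 2*V) 1 '1' (by omega) (by rw [show (3 + 2*V) % 2 = 1 from by omega]; rfl) s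
        have h0 := hrec ('1' :: s) 1 (by omega)
        simp only [Nat.cast_one] at h0
        rw [h0, hl, hc]

lemma pvNatToBin_val : ∀ v, pvVal (pvNatToBin v) = v := by
  intro v
  induction v using Nat.strong_induction_on with
  | _ v ih =>
      rw [pvNatToBin]
      split
      · simp [pvVal]; omega
      · rename_i hv
        rw [pvVal_append, ih (v / 2) (Nat.div_lt_self (Nat.pos_of_ne_zero hv) (by omega))]
        have hb : pvVal [if v % 2 = 1 then '1' else '0'] = v % 2 := by
          rcases Nat.mod_two_eq_zero_or_one v with h | h <;> simp [h, pvVal, pvBit]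
        rw [hb]
        simp
        omega

lemma pvNatToBin_allBin : ∀ v, pvAllBin (pvNatToBin v) := by
  intro v
  induction v using Nat.strong_induction_on with
  | _ v ih =>
      rw [pvNatToBin]
      split
      · intro c hc; simp at hc
      · rename_i hv
        intro c hc
        simp only [List.mem_append, List.mem_singleton] at hc
        rcases hc with hc | hc
        · exact ih (v / 2) (Nat.div_lt_self (Nat.pos_of_ne_zero hv) (by omega)) c hc
        · subst hc; split <;> simp

lemma pvNatToBin_length_le (k : Nat) : ∀ v, v < 2 ^ k → (pvNatToBin v).length ≤ k := by
  induction k with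
  | zero =>
      intro v hv
      have : v = 0 := by simpa using hv
      subst this
      rw [pvNatToBin]; simp
  | succ k ih =>
      intro v hv
      rw [pvNatToBin]
      split
      · simp
      · rename_i hv0
        have hd : v / 2 < 2 ^ k := by
          rw [Nat.div_lt_iff_lt_mul (by norm_num)]
          rw [pow_succ] at hv; omega
        simpa using ih (v / 2) hd

lemma pvNatToBin_length_gt (k : Nat) : ∀ v, 2 ^ k ≤ v → k < (pvNatToBin v).length := by
  induction k with
  | zero =>
      intro v hv
      rw [pvNatToBin]
      rw [dif_neg (by omega)]
      simp
  | succ k ih =>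
      intro v hv
      have h1 : 1 ≤ v := le_trans (Nat.one_le_two_pow) hv
      rw [pvNatToBin, dif_neg (by omega)]
      have hd : 2 ^ k ≤ v / 2 := by
        rw [Nat.le_div_iff_mul_le (by norm_num)]
        rw [pow_succ] at hv; omega
      have := ih (v / 2) hd
      simp
      omega

-- two bit strings of the same length and value coincide
lemma pvUniq (s : List Char) : ∀ t, pvAllBin s → pvAllBin t → s.length = t.length →
    pvVal s = pvVal t → s = t := by
  induction s with
  | nil =>
      intro t _ _ hlen _
      exact (List.eq_nil_of_length_eq_zero hlen.symm).symm
  | cons c s' ih =>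
      intro t hs ht hlen hval
      cases t with
      | nil => simp at hlen
      | cons d t' =>
          have hlen' : s'.length = t'.length := by simpa using hlen
          have hc := hs c (List.mem_cons_self ..)
          have hd := ht d (List.mem_cons_self ..)
          have hs' : pvAllBin s' := fun x hx => hs x (List.mem_cons_of_mem _ hx)
          have ht' : pvAllBin t' := fun x hx => ht x (List.mem_cons_of_mem _ hx)
          rw [pvVal_cons, pvVal_cons, hlen'] at hval
          have hvs := pvVal_lt s'
          have hvt := pvVal_lt t'
          rw [hlen'] at hvs
          have hcd : pvBit c = pvBit d ∧ pvVal s' = pvVal t' := by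
            have h1 := pvBit_le c
            have h2 := pvBit_le d
            rcases Nat.le_one_iff_eq_zero_or_eq_one.mp h1 with h1' | h1' <;>
              rcases Nat.le_one_iff_eq_zero_or_eq_one.mp h2 with h2' | h2' <;>
                rw [h1', h2'] at hval ⊢ <;> omega
          have : c = d := by
            rcases hc with rfl | rfl <;> rcases hd with rfl | rfl <;>
              simp [pvBit] at hcd ⊢
          subst this
          rw [ih t' hs' ht' hlen' hcd.2]

-- the padded format output equals A's summary (with the carry bit)
lemma pvPadEq (n v : Nat) (hn : 0 < n) (hv : v < 2 ^ (n + 1)) :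
    List.replicate (n - (pvNatToBin v).length) '0' ++ pvNatToBin v =
      if v / 2 ^ n = 1 then '1' :: pvLowBits n v else pvLowBits n v := by
  have hrepBin : pvAllBin (List.replicate (n - (pvNatToBin v).length) '0' ++ pvNatToBin v) := by
    intro c hc
    rcases List.mem_append.mp hc with hc | hc
    · left; exact List.eq_of_mem_replicate hc
    · exact pvNatToBin_allBin v c hc
  have hrepVal : pvVal (List.replicate (n - (pvNatToBin v).length) '0' ++ pvNatToBin v) = v := by
    rw [pvVal_append, pvVal_replicate_zero, pvNatToBin_val]; ring
  by_cases hle : 2 ^ n ≤ v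
  · -- overflow: the carry bit is set
    have hq : v / 2 ^ n = 1 := by
      apply Nat.div_eq_of_lt_le
      · simpa using hle
      · rw [pow_succ] at hv; omega
    rw [if_pos hq]
    apply pvUniq _ _ hrepBin
    · intro c hc
      rcases List.mem_cons.mp hc with rfl | hc
      · right; rfl
      · exact pvLowBits_allBin n v c hc
    · have hlen : (pvNatToBin v).length = n + 1 :=
        le_antisymm (pvNatToBin_length_le (n + 1) v hv) (pvNatToBin_length_gt n v hle)
      simp [hlen, pvLowBits_length]
    · rw [hrepVal, pvVal_cons, pvVal_lowBits, pvLowBits_length]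
      have hmod : v % 2 ^ n = v - 2 ^ n := by
        have h2 : v - 2 ^ n < 2 ^ n := by rw [pow_succ] at hv; omega
        conv_lhs => rw [show v = 2 ^ n + (v - 2 ^ n) from by omega]
        rw [Nat.add_mod_left, Nat.mod_eq_of_lt h2]
      rw [hmod]
      simp [pvBit]
      omega
  · -- no overflow: exactly n digits
    push_neg at hle
    have hq : v / 2 ^ n = 0 := Nat.div_eq_of_lt hle
    rw [if_neg (by omega)]
    apply pvUniq _ _ hrepBin (pvLowBits_allBin n v)
    · have hlen : (pvNatToBin v).length ≤ n := pvNatToBin_length_le n v hle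
      simp [pvLowBits_length]
      omega
    · rw [hrepVal, pvVal_lowBits, Nat.mod_eq_of_lt hle]

-- the whole equivalence, phrased over the underlying character lists
lemma pvMain (L1 L2 : List Char)
    (hpre : ∀ p ∈ L1.reverse.zip L2.reverse, (p.1 = '0' ∨ p.1 = '1') ∧ (p.2 = '0' ∨ p.2 = '1')) :
    (let p := pvALoop (L1.reverse.zip L2.reverse) [] 0
     let summary := if p.2 = 1 then '1' :: p.1 else p.1
     let summary2 := if summary.length > 32 then summary.drop (summary.length - 32) else summary
     String.mk summary2)
    = (let n := min L1.length L2.length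
       if n = 0 then "" else
       let a := L1.drop (L1.length - n)
       let b := L2.drop (L2.length - n)
       let val := (a.zip b).foldl (fun acc p => 2 * acc + pvBit p.1 + pvBit p.2) 0
       let out := List.replicate (n - (pvNatToBin val).length) '0' ++ pvNatToBin val
       String.mk (if out.length > 32 then out.drop (out.length - 32) else out)) := by
  by_cases h0 : min L1.length L2.length = 0
  · have hz : L1.reverse.zip L2.reverse = [] := by
      rcases Nat.min_eq_zero_iff.mp h0 with h | h
      · rw [List.eq_nil_of_length_eq_zero h]; rfl
      · rw [List.eq_nil_of_length_eq_zero h]; simp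
    simp only [hz, h0, if_pos]
    rfl
  · set n := min L1.length L2.length with hn
    have hnl1 : n ≤ L1.length := Nat.min_le_left _ _
    have hnl2 : n ≤ L2.length := Nat.min_le_right _ _
    set a := L1.drop (L1.length - n) with ha_def
    set b := L2.drop (L2.length - n) with hb_def
    have ha : a.length = n := by rw [ha_def, List.length_drop]; omega
    have hb : b.length = n := by rw [hb_def, List.length_drop]; omega
    have hzip : L1.reverse.zip L2.reverse = a.reverse.zip b.reverse := by
      conv_lhs =>
        rw [← List.take_append_drop (L1.length - n) L1, ← List.take_append_drop (L2.length - n) L2]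
      rw [← ha_def, ← hb_def, List.reverse_append, List.reverse_append,
        List.zip_append (by simp [ha, hb])]
      have htail : (L1.take (L1.length - n)).reverse.zip (L2.take (L2.length - n)).reverse = [] := by
        rcases Nat.le_total L1.length L2.length with hL | hL
        · have h1 : L1.length - n = 0 := by omega
          simp [h1]
        · have h2 : L2.length - n = 0 := by omega
          simp [h2]
      rw [htail, List.append_nil]
    have hA : ∀ p ∈ a.reverse.zip b.reverse, (p.1 = '0' ∨ p.1 = '1') ∧ (p.2 = '0' ∨ p.2 = '1') :=
      fun p hp => hpre p (hzip ▸ hp)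
    have haBin : ∀ (c : Char), c ∈ a → c = '0' ∨ c = '1' := by
      intro c hc
      have hc' : c ∈ (a.reverse.zip b.reverse).map Prod.fst := by
        rw [List.map_fst_zip (by simp [ha, hb])]
        simpa using hc
      obtain ⟨p, hp, hp1⟩ := List.mem_map.mp hc'
      exact hp1 ▸ (hA p hp).1
    have hbBin : ∀ (c : Char), c ∈ b → c = '0' ∨ c = '1' := by
      intro c hc
      have hc' : c ∈ (a.reverse.zip b.reverse).map Prod.snd := by
        rw [List.map_snd_zip (by simp [ha, hb])]
        simpa using hc
      obtain ⟨p, hp, hp2⟩ := List.mem_map.mp hc'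
      exact hp2 ▸ (hA p hp).2
    set T := pvVal a + pvVal b with hTdef
    have hT : pvValRev (a.reverse.zip b.reverse) = T := pvValRev_zip_reverse a b (ha.trans hb.symm)
    have hTlt : T < 2 ^ (n + 1) := by
      have h1 := pvVal_lt a
      have h2 := pvVal_lt b
      rw [ha] at h1
      rw [hb] at h2
      rw [pow_succ]; omega
    have hzlen : (a.reverse.zip b.reverse).length = n := by simp [ha, hb]
    have hloop := pvALoop_spec _ hA [] 0 (by omega)
    simp only [Nat.cast_zero, Nat.add_zero, hzlen, hT, List.append_nil] at hloop
    have hval : (a.zip b).foldl (fun acc p => 2 * acc + pvBit p.1 + pvBit p.2) 0 = T := by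
      have := pvPairFold a b (ha.trans hb.symm) 0 0
      simpa using this
    simp only [hzip, if_neg h0]
    rw [← ha_def, ← hb_def, hloop, hval, pvPadEq n T (by omega) hTlt]
    have hcarry : T / 2 ^ n ≤ 1 := by
      have : T / 2 ^ n < 2 := by
        rw [Nat.div_lt_iff_lt_mul (Nat.two_pow_pos n)]
        rw [pow_succ] at hTlt; omega
      omega
    dsimp only
    have hAcond : ((T / 2 ^ n : Nat) : Int) = 1 ↔ T / 2 ^ n = 1 := by exact_mod_cast Iff.rfl
    by_cases hcc : T / 2 ^ n = 1
    · rw [if_pos (hAcond.mpr hcc), if_pos hcc]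
    · rw [if_neg (fun h => hcc (hAcond.mp h)), if_neg hcc]

-- ===== VERDICT (by name: the statement is the Claim_ definition above) =====
theorem two_complement_sum_spec : Claim_equal_two_complement_sum := by
  intro f s _ hpre
  unfold Spec_two_complement_sum two_complement_sum two_complement_sum_alt
  exact pvMain f.toList s.toList hpre
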